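-- pv_equiv track=rewrite | github.com/tuukkatoivonen/scrittabot | tool_matrix.py | _is_room_alias
-- ===== SOURCE A (Python) =====
-- def _is_room_alias(room_id: str) -> bool:
--     """Determine if room identifier is a room alias.
--
--     Room aliases are of syntax: #somealias:someserver
--     This is not an exhaustive check!
--
--     """
--     return (
--         room_id
--         and len(room_id) > 3
--         and (room_id[0] == '#')
--         and ('#' not in room_id[1:])
--         and (':' in room_id)
--         and room_id.count(':') == 1
--         and (' ' not in room_id)
--         and not any(elem in room_id for elem in '[]{} ')  # contains bad chars?
--     )
-- ===== SOURCE B (Python) =====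
-- def _is_room_alias(room_id: str) -> bool:
--     """Single-pass check: reject early on shape, then count '#' and ':' while
--     rejecting bad characters in one traversal."""
--     if len(room_id) <= 3 or room_id[0] != '#':
--         return False
--     hashes = 0
--     colons = 0
--     for ch in room_id:
--         if ch in '[]{} ':
--             return False
--         if ch == '#':
--             hashes += 1
--         elif ch == ':':
--             colons += 1
--     return hashes == 1 and colons == 1
-- ===== Notes on version B (the rewrite author's own statement) =====
-- stated objective: alternative
-- what changed: Replaces A's chain of six separate scans (count, slicing, membership tests, a generator over bad chars) by one early-exit guard plus a single traversal maintaining '#' and ':' counters.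
-- outside the precondition, e.g. on _is_room_alias(''): A returns '', B returns False
import Mathlib
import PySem

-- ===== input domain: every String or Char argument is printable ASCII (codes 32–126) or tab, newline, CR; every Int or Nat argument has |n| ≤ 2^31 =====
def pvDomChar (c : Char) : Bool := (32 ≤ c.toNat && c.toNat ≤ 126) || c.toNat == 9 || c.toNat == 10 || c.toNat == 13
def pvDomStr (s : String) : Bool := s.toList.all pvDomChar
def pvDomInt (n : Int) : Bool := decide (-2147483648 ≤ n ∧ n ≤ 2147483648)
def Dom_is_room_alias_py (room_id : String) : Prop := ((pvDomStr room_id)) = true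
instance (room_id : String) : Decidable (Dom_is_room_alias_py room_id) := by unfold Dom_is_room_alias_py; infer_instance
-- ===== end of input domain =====

-- B replaces A's chain of six separate scans by one guard plus a single counting traversal (alternative decomposition, same O(n) cost).


-- ===== PORT A =====
def is_room_alias_py (room_id : String) : Bool :=
  let cs := room_id.toList
  (!cs.isEmpty)
  && decide (3 < PySem.Chars.len cs)
  && (PySem.Chars.pyGet? cs 0 == some '#')
  && (!PySem.Chars.isIn ['#'] (PySem.Chars.slice cs (some 1) none))
  && PySem.Chars.isIn [':'] cs
  && (PySem.Chars.count cs [':'] == 1)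
  && (!PySem.Chars.isIn [' '] cs)
  && (!(['[', ']', '{', '}', ' '].any (fun elem => PySem.Chars.isIn [elem] cs)))

-- ===== PORT B =====
def pvBad : List Char := ['[', ']', '{', '}', ' ']

def pvAltScan : List Char → Nat → Nat → Bool
  | [], hashes, colons => hashes == 1 && colons == 1
  | ch :: rest, hashes, colons =>
    if pvBad.contains ch then false
    else if ch == '#' then pvAltScan rest (hashes + 1) colons
    else if ch == ':' then pvAltScan rest hashes (colons + 1)
    else pvAltScan rest hashes colons

def is_room_alias_py_alt (room_id : String) : Bool :=
  let cs := room_id.toList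
  if PySem.Chars.len cs ≤ 3 || !(PySem.Chars.pyGet? cs 0 == some '#') then false
  else pvAltScan cs 0 0

-- ===== PRECONDITION & SPEC =====
-- Pre_ excludes only the empty string, on which Python A returns '' (a str, not a bool of the declared type); B returns False there.
def Pre_is_room_alias_py (room_id : String) : Prop := room_id ≠ ""
instance (room_id : String) : Decidable (Pre_is_room_alias_py room_id) := by unfold Pre_is_room_alias_py; infer_instance
def pvWitness_is_room_alias_py : String := "#ab:cd"

def Spec_is_room_alias_py (room_id : String) (out : Bool) : Prop := out = is_room_alias_py_alt room_id
instance (room_id : String) (out : Bool) : Decidable (Spec_is_room_alias_py room_id out) := by unfold Spec_is_room_alias_py; infer_instance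

-- ===== CLAIM (what is proved, stated in full; the proofs are below) =====
def Claim_equal_is_room_alias_py : Prop := ∀ (room_id : String), Dom_is_room_alias_py room_id → Pre_is_room_alias_py room_id → Spec_is_room_alias_py room_id (is_room_alias_py room_id)

-- ===== LEMMAS AND PROOFS =====

-- spec of B's loop: false iff some bad char, else both counters end at 1
theorem pvAltScan_eq (cs : List Char) (h c : Nat) :
    pvAltScan cs h c
      = ((!cs.any (fun x => pvBad.contains x))
          && ((h + cs.count '#' == 1) && (c + cs.count ':' == 1))) := by
  induction cs generalizing h c with
  | nil => simp [pvAltScan]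
  | cons x t ih =>
    by_cases hb : x ∈ pvBad
    · simp [pvAltScan, hb]
    · by_cases hh : x = '#'
      · subst hh
        simp [pvAltScan, hb, ih, Nat.add_comm, Nat.add_left_comm]
      · by_cases hc : x = ':'
        · subst hc
          simp [pvAltScan, hb, hh, ih, Nat.add_comm, Nat.add_left_comm]
        · simp [pvAltScan, hb, hh, hc, ih]

-- Python's s.count(single char) is List.count
theorem count_go_singleton (ch : Char) (l : List Char) (fuel acc : Nat)
    (hf : l.length ≤ fuel) :
    PySem.Chars.count.go [ch] fuel l acc = acc + l.count ch := by
  induction l generalizing fuel acc with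
  | nil => cases fuel <;> simp [PySem.Chars.count.go]
  | cons x t ih =>
    cases fuel with
    | zero => simp at hf
    | succ f =>
      by_cases hx : ch = x
      · subst hx
        have hpre : [ch].isPrefixOf (ch :: t) = true := by simp [List.isPrefixOf]
        simp only [PySem.Chars.count.go, hpre]
        rw [show List.drop [ch].length (ch :: t) = t from rfl]
        rw [ih f (acc + 1) (by simpa using hf)]
        simp
        omega
      · have hp : [ch].isPrefixOf (x :: t) = false := by
          simp [List.isPrefixOf, hx]
        simp only [PySem.Chars.count.go, hp]
        rw [ih f acc (by simpa using hf)]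
        have hxc2 : ¬ x = ch := fun hE => hx hE.symm
        simp [hxc2]

theorem chars_count_singleton (s : List Char) (ch : Char) :
    PySem.Chars.count s [ch] = s.count ch := by
  unfold PySem.Chars.count
  simp [count_go_singleton ch s s.length 0 le_rfl]

theorem singleton_infix_iff (a : Char) (s : List Char) : [a] <:+: s ↔ a ∈ s := by
  constructor
  · intro hinf
    exact List.singleton_sublist.mp hinf.sublist
  · intro hm
    obtain ⟨u, v, rfl⟩ := List.append_of_mem hm
    exact ⟨u, v, by simp⟩

theorem isIn_singleton (a : Char) (s : List Char) :
    PySem.Chars.isIn [a] s = s.contains a := by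
  by_cases h : a ∈ s
  · rw [(PySem.Chars.isIn_iff_infix _ _).mpr ((singleton_infix_iff a s).mpr h)]
    simp [h]
  · rw [(PySem.Chars.isIn_eq_false_iff _ _).mpr
      (fun hinf => h ((singleton_infix_iff a s).mp hinf))]
    simp [h]

-- ===== VERDICT (by name: the statement is the Claim_ definition above) =====
theorem is_room_alias_py_spec : Claim_equal_is_room_alias_py := by
  intro room_id _ hpre
  unfold Spec_is_room_alias_py is_room_alias_py is_room_alias_py_alt
  have hne : room_id.toList ≠ [] := by
    intro h
    apply hpre
    have h2 : room_id.toList = "".toList := by simpa using h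
    exact String.toList_inj.mp h2
  obtain ⟨x, t, hxt⟩ := List.exists_cons_of_ne_nil hne
  simp only [hxt]
  simp only [PySem.Chars.len_eq, PySem.Chars.pyGet?_eq_listPyGet?,
    PySem.Chars.slice_eq_listSlice, chars_count_singleton, isIn_singleton,
    pvAltScan_eq]
  rw [PySem.List.slice_from (x :: t) (by norm_num : (0 : Int) ≤ 1)]
  by_cases hlen : 3 ≤ t.length
  · by_cases hx0 : x = '#'
    · subst hx0
      have h2 : ¬ t.length < 3 := by omega
      rw [Bool.eq_iff_iff]
      simp [PySem.List.pyGet?, PySem.List.pyIdx?, hlen, h2, pvBad]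
      constructor
      · rintro ⟨⟨⟨⟨hsharp, hcol⟩, hcnt⟩, hsp⟩, h1', h2', h3', h4', h5'⟩
        refine ⟨fun y hy => ⟨fun e => h1' (e ▸ hy), fun e => h2' (e ▸ hy),
          fun e => h3' (e ▸ hy), fun e => h4' (e ▸ hy), fun e => h5' (e ▸ hy)⟩,
          List.count_eq_zero.mpr hsharp, hcnt⟩
      · rintro ⟨hok, hc0, hc1⟩
        have hsharp : '#' ∉ t := List.count_eq_zero.mp hc0
        have hcol : ':' ∈ t := List.count_pos_iff.mp (show 0 < List.count ':' t by omega)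
        exact ⟨⟨⟨⟨hsharp, hcol⟩, hc1⟩, fun hy => (hok _ hy).2.2.2.2 rfl⟩,
          fun hy => (hok _ hy).1 rfl, fun hy => (hok _ hy).2.1 rfl,
          fun hy => (hok _ hy).2.2.1 rfl, fun hy => (hok _ hy).2.2.2.1 rfl,
          fun hy => (hok _ hy).2.2.2.2 rfl⟩
    · simp [PySem.List.pyGet?, PySem.List.pyIdx?, hx0]
  · have h2 : t.length < 3 := by omega
    simp [hlen, h2]
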